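-- pv_equiv track=rewrite | github.com/dmitriimalahov-gif/Numerom2 | backend/numerology.py | reduce_for_ruling_number
-- ===== SOURCE A (Python) =====
-- def reduce_for_ruling_number(number: int) -> int:
--     """Reduce number for ruling number - keeps only 11 and 22 as master numbers"""
--     if number in [11, 22]:
--         return number
--
--     while number > 9:
--         number = sum(int(digit) for digit in str(number))
--         # Check if we have 11 or 22 during reduction
--         if number in [11, 22]:
--             return number
--     return number
-- ===== SOURCE B (Python) =====
-- def reduce_for_ruling_number(number: int) -> int:
--     """Recursive digital-root reduction keeping master numbers 11/22; digit sum by arithmetic."""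
--     if number in (11, 22) or number <= 9:
--         return number
--     s = 0
--     m = number
--     while m > 0:
--         s += m % 10
--         m //= 10
--     return reduce_for_ruling_number(s)
-- ===== Notes on version B (the rewrite author's own statement) =====
-- stated objective: alternative
-- what changed: Replaces the while-loop with string round-trip digit extraction (building str of the number and re-parsing each character) and per-step master checks by a direct recursion with one combined base case that computes the digit sum arithmetically via modulus and floor division, touching no strings at all.
import Mathlib
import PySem

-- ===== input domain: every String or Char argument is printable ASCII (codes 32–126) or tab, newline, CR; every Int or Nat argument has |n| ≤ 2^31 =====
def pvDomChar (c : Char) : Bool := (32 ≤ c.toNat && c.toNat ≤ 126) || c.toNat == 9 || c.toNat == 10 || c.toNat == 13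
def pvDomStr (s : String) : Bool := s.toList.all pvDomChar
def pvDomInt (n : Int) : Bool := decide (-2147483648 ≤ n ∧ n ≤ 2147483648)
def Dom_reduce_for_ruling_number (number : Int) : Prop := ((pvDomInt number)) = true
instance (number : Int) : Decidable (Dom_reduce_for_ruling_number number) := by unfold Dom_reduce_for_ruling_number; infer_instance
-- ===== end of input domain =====

-- B replaces A's while-loop with string-based digit extraction and per-step master checks by a
-- direct recursion with one combined base case and an arithmetic (%10, //10) digit sum.

-- ===== PORT A =====
-- sum(int(digit) for digit in str(n)) — str(n) via PySem.Int.toChars, int(d) via PySem.Int.ofChars?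
-- (A only applies it to n > 9, whose chars are digits, so the .getD 0 default is never taken)
def pvDigitSum (n : Int) : Int :=
  ((PySem.Int.toChars n).map (fun d => (PySem.Int.ofChars? [d]).getD 0)).sum

-- the 'while number > 9' loop, fuel-bounded (fuel number.toNat + 1 always suffices:
-- the digit sum strictly decreases above 9)
def pvReduceLoop : Nat → Int → Int
  | 0, number => number
  | fuel+1, number =>
    if number > 9 then
      let number' := pvDigitSum number
      if number' = 11 ∨ number' = 22 then number'
      else pvReduceLoop fuel number'
    else number

def reduce_for_ruling_number (number : Int) : Int :=
  if number = 11 ∨ number = 22 then number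
  else pvReduceLoop (number.toNat + 1) number

-- ===== PORT B =====
-- Source B's inner 'while m > 0: s += m % 10; m //= 10', fuel-bounded (m.toNat + 1 suffices: m shrinks)
def pvArithLoop : Nat → Int → Int → Int
  | 0, s, _ => s
  | fuel+1, s, m =>
    if m > 0 then pvArithLoop fuel (s + PySem.Int.mod m 10) (PySem.Int.floordiv m 10)
    else s

-- Source B's outer recursion, fuel-bounded with the same always-sufficient fuel
def pvReduceRec : Nat → Int → Int
  | 0, number => number
  | fuel+1, number =>
    if number = 11 ∨ number = 22 ∨ number ≤ 9 then number
    else pvReduceRec fuel (pvArithLoop (number.toNat + 1) 0 number)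

def reduce_for_ruling_number_alt (number : Int) : Int :=
  pvReduceRec (number.toNat + 1) number

-- ===== PRECONDITION & SPEC =====
def Spec_reduce_for_ruling_number (number : Int) (out : Int) : Prop := out = reduce_for_ruling_number_alt number
instance (number : Int) (out : Int) : Decidable (Spec_reduce_for_ruling_number number out) := by unfold Spec_reduce_for_ruling_number; infer_instance

-- ===== CLAIM =====
def Claim_equal_reduce_for_ruling_number : Prop := ∀ (number : Int), Dom_reduce_for_ruling_number number → Spec_reduce_for_ruling_number number (reduce_for_ruling_number number)

-- ===== LEMMAS AND PROOFS =====

-- the int(d) applied to a single decimal digit char gives back the digit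
theorem pvDigitChar_val (d : Nat) (h : d < 10) :
    (PySem.Int.ofChars? [Nat.digitChar d]).getD 0 = (d : Int) := by
  interval_cases d <;> decide

-- char-level digit sum of Nat.toDigitsCore equals the Nat.digits sum (plus the accumulator)
theorem pvCoreSum : ∀ (fuel n : Nat) (ds : List Char), n < fuel →
    ((Nat.toDigitsCore 10 fuel n ds).map (fun d => (PySem.Int.ofChars? [d]).getD 0)).sum
      = ((Nat.digits 10 n).sum : Int)
        + (ds.map (fun d => (PySem.Int.ofChars? [d]).getD 0)).sum := by
  intro fuel
  induction fuel with
  | zero => intro n ds h; omega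
  | succ f ih =>
    intro n ds h
    rw [Nat.toDigitsCore]
    by_cases h0 : n / 10 = 0
    · simp only [h0]
      by_cases hn : n = 0
      · subst hn; simp [pvDigitChar_val 0 (by omega)]
      · have hd : Nat.digits 10 n = [n % 10] := by
          rw [Nat.digits_def' (by omega) (by omega), h0]; simp
        simp [hd, pvDigitChar_val (n % 10) (Nat.mod_lt _ (by omega))]
    · have hn : 0 < n := by
        by_contra hc; push_neg at hc
        interval_cases n; simp at h0
      rw [if_neg h0, ih (n / 10) _ (by omega)]
      have hd : Nat.digits 10 n = n % 10 :: Nat.digits 10 (n / 10) :=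
        Nat.digits_def' (by omega) hn
      simp [hd, pvDigitChar_val (n % 10) (Nat.mod_lt _ (by omega))]
      ring

-- A's string-based digit sum, for nonnegative n, is the Nat.digits sum
theorem pvDigitSum_eq (n : Int) (h : 0 ≤ n) :
    pvDigitSum n = ((Nat.digits 10 n.toNat).sum : Int) := by
  unfold pvDigitSum PySem.Int.toChars
  rw [if_neg (by omega), Nat.toDigits,
      pvCoreSum (n.toNat + 1) n.toNat [] (by omega)]
  simp

-- B's arithmetic loop computes the same Nat.digits sum
theorem pvArithLoop_eq : ∀ (fuel : Nat) (s m : Int), 0 ≤ m → m.toNat < fuel →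
    pvArithLoop fuel s m = s + ((Nat.digits 10 m.toNat).sum : Int) := by
  intro fuel
  induction fuel with
  | zero => intro s m _ h; omega
  | succ f ih =>
    intro s m hm h
    rw [pvArithLoop]
    by_cases hpos : m > 0
    · rw [if_pos hpos]
      have hmod : PySem.Int.mod m 10 = m % 10 := PySem.Int.mod_eq_emod_of_pos (by omega)
      have hdiv : PySem.Int.floordiv m 10 = m / 10 := PySem.Int.floordiv_eq_ediv_of_pos (by omega)
      have ht : (m / 10).toNat = m.toNat / 10 := by omega
      rw [hmod, hdiv, ih _ _ (by positivity) (by omega), ht]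
      have hd : Nat.digits 10 m.toNat = m.toNat % 10 :: Nat.digits 10 (m.toNat / 10) :=
        Nat.digits_def' (by omega) (by omega)
      rw [hd]
      simp only [List.sum_cons]
      omega
    · have hz : m = 0 := by omega
      rw [if_neg hpos, hz]
      simp

-- hence A's step and B's step agree on all n > 9
theorem pvStep_eq (n : Int) (h : 9 < n) :
    pvDigitSum n = pvArithLoop (n.toNat + 1) 0 n := by
  rw [pvDigitSum_eq n (by omega), pvArithLoop_eq (n.toNat + 1) 0 n (by omega) (by omega),
      zero_add]

-- B's recursion fixes master numbers at any fuel
theorem pvReduceRec_master (fuel : Nat) (n : Int) (h : n = 11 ∨ n = 22) :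
    pvReduceRec fuel n = n := by
  cases fuel with
  | zero => rfl
  | succ f => simp [pvReduceRec, h.elim (fun h => Or.inl h) (fun h => Or.inr (Or.inl h))]

-- A's loop and B's recursion agree at equal fuel on non-master inputs
theorem pvReduceLoop_eq_rec (fuel : Nat) :
    ∀ n : Int, ¬ (n = 11 ∨ n = 22) → pvReduceLoop fuel n = pvReduceRec fuel n := by
  induction fuel with
  | zero => intro n _; rfl
  | succ f ih =>
    intro n hn
    by_cases h9 : n > 9
    · have hb : ¬ (n = 11 ∨ n = 22 ∨ n ≤ 9) := by
        rcases not_or.mp hn with ⟨h1, h2⟩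
        rintro (h | h | h)
        · exact h1 h
        · exact h2 h
        · omega
      simp only [pvReduceLoop, pvReduceRec, if_pos h9, if_neg hb, ← pvStep_eq n h9]
      by_cases hm : pvDigitSum n = 11 ∨ pvDigitSum n = 22
      · simp [hm, pvReduceRec_master f _ hm]
      · simp [hm, ih _ hm]
    · have hb : n = 11 ∨ n = 22 ∨ n ≤ 9 := Or.inr (Or.inr (by omega))
      simp [pvReduceLoop, pvReduceRec, h9, hb]

-- ===== VERDICT =====
theorem reduce_for_ruling_number_spec : Claim_equal_reduce_for_ruling_number := by
  intro n _
  unfold Spec_reduce_for_ruling_number reduce_for_ruling_number reduce_for_ruling_number_alt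
  by_cases hm : n = 11 ∨ n = 22
  · rw [if_pos hm, pvReduceRec_master _ _ hm]
  · rw [if_neg hm, pvReduceLoop_eq_rec _ _ hm]
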